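-- pv_equiv track=rewrite | github.com/BrianLi009/SAT-nauty | verifiers/drat_verifier.py | edge_var_to_vertices
-- ===== SOURCE A (Python) =====
-- from typing import List, Tuple, Set, Dict, Optional, NamedTuple, Union
--
-- def edge_var_to_vertices(edge_var: int, n: int) -> Tuple[int, int]:
--     """Convert edge variable to vertex pair (i, j) where i < j."""
--     # Edge variables are arranged column by column in upper triangle
--     # For n=3: 1->(0,1), 2->(0,2), 3->(1,2)
--     # For n=4: 1->(0,1), 2->(0,2), 3->(0,3), 4->(1,2), 5->(1,3), 6->(2,3)
--
--     current_var = 1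
--     for col in range(1, n):
--         for row in range(col):
--             if current_var == edge_var:
--                 return row, col
--             current_var += 1
--
--     raise ValueError(f"Edge variable {edge_var} out of range for n={n}")
-- ===== SOURCE B (Python) =====
-- def edge_var_to_vertices(edge_var: int, n: int):
--     """Convert edge variable to vertex pair (i, j) where i < j.
--
--     Closed-form/binary-search version: column counts are cumulative
--     triangular numbers, so binary-search the column, derive the row.
--     """
--     total = n * (n - 1) // 2
--     if not (1 <= edge_var <= total):
--         raise ValueError(f"Edge variable {edge_var} out of range for n={n}")
--     # smallest col in [1, n-1] with col*(col+1)//2 >= edge_var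
--     lo, hi = 1, n - 1
--     while lo < hi:
--         mid = (lo + hi) // 2
--         if mid * (mid + 1) // 2 >= edge_var:
--             hi = mid
--         else:
--             lo = mid + 1
--     col = lo
--     row = edge_var - 1 - col * (col - 1) // 2
--     return row, col
-- ===== Notes on version B (the rewrite author's own statement) =====
-- stated objective: faster
-- what changed: Replaced the O(n^2) double loop counting edge variables one by one with a range check plus a binary search over cumulative triangular counts for the column and an arithmetic formula for the row.
import Mathlib
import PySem

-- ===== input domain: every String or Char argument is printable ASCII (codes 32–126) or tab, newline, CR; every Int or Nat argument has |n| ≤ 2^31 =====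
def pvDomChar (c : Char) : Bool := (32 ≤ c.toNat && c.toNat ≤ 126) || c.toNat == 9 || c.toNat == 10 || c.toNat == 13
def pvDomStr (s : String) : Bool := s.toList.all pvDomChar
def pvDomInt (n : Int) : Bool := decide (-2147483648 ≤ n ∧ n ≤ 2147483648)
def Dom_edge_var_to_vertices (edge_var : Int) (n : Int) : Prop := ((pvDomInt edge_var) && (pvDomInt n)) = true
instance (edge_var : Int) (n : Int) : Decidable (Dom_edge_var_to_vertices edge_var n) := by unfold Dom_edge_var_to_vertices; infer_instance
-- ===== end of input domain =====

-- B replaces A's O(n^2) column-by-column counting loop with a binary search over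
-- cumulative triangular counts plus an arithmetic formula for the row (objective: faster).

-- ===== PORT A =====
-- `for row in range(col)` with the early `return row, col`; the fuel is the number of
-- remaining iterations of the range, row/current_var advance exactly as in the Python
def pvInnerLoop (edge_var col : Int) : Nat → Int → Int → Option (Int × Int) × Int
  | 0, _row, current => (none, current)
  | fuel + 1, row, current =>
    if current = edge_var then (some (row, col), current)
    else pvInnerLoop edge_var col fuel (row + 1) (current + 1)

-- `for col in range(1, n)`: fuel counts the remaining columns, col advances by 1
def pvOuterLoop (edge_var : Int) : Nat → Int → Int → Option (Int × Int) × Int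
  | 0, _col, current => (none, current)
  | fuel + 1, col, current =>
    match pvInnerLoop edge_var col col.toNat 0 current with
    | (some p, v) => (some p, v)
    | (none, v) => pvOuterLoop edge_var fuel (col + 1) v

def edge_var_to_vertices (edge_var : Int) (n : Int) : Int × Int :=
  match pvOuterLoop edge_var (n - 1).toNat 1 1 with
  | (some p, _) => p
  | (none, _) => (0, 0)   -- Python raises ValueError here; excluded by Pre_

-- ===== PORT B =====
-- mid = (lo + hi) // 2
def pvMid (lo hi : Int) : Int := PySem.Int.floordiv (lo + hi) 2

-- while lo < hi: the fuel (hi - lo).toNat bounds the number of iterations (the gap shrinks each step)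
def pvBsearchGo (edge_var : Int) : Nat → Int → Int → Int
  | 0, lo, _hi => lo
  | fuel + 1, lo, hi =>
    if lo < hi then
      if PySem.Int.floordiv (pvMid lo hi * (pvMid lo hi + 1)) 2 ≥ edge_var then
        pvBsearchGo edge_var fuel lo (pvMid lo hi)
      else
        pvBsearchGo edge_var fuel (pvMid lo hi + 1) hi
    else lo

def pvBsearch (edge_var lo hi : Int) : Int := pvBsearchGo edge_var (hi - lo).toNat lo hi

def edge_var_to_vertices_alt (edge_var : Int) (n : Int) : Int × Int :=
  let total := PySem.Int.floordiv (n * (n - 1)) 2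
  if 1 ≤ edge_var ∧ edge_var ≤ total then
    let col := pvBsearch edge_var 1 (n - 1)
    (edge_var - 1 - PySem.Int.floordiv (col * (col - 1)) 2, col)
  else (0, 0)   -- Python raises ValueError here; excluded by Pre_

-- ===== PRECONDITION & SPEC =====
-- Pre_ excludes exactly the inputs on which A raises ValueError: edge_var outside 1..n*(n-1)//2.
def Pre_edge_var_to_vertices (edge_var : Int) (n : Int) : Prop :=
  2 ≤ n ∧ 1 ≤ edge_var ∧ 2 * edge_var ≤ n * (n - 1)
instance (edge_var : Int) (n : Int) : Decidable (Pre_edge_var_to_vertices edge_var n) := by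
  unfold Pre_edge_var_to_vertices; infer_instance

def pvWitness_edge_var_to_vertices : Int × Int := (1, 2)

def Spec_edge_var_to_vertices (edge_var : Int) (n : Int) (out : Int × Int) : Prop :=
  out = edge_var_to_vertices_alt edge_var n
instance (edge_var : Int) (n : Int) (out : Int × Int) : Decidable (Spec_edge_var_to_vertices edge_var n out) := by
  unfold Spec_edge_var_to_vertices; infer_instance

-- ===== CLAIM (what is proved, stated in full; the proofs are below) =====
def Claim_equal_edge_var_to_vertices : Prop :=
  ∀ (edge_var : Int) (n : Int), Dom_edge_var_to_vertices edge_var n →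
    Pre_edge_var_to_vertices edge_var n →
    Spec_edge_var_to_vertices edge_var n (edge_var_to_vertices edge_var n)

-- ===== LEMMAS AND PROOFS =====

-- triangular count: number of edge variables strictly before column c (columns 1..c-1)
def pvT (c : Int) : Int := PySem.Int.floordiv (c * (c - 1)) 2

theorem pvT_succ (c : Int) : pvT (c + 1) = pvT c + c := by
  unfold pvT
  have h1 : PySem.Int.floordiv ((c + 1) * (c + 1 - 1)) 2 = ((c + 1) * (c + 1 - 1)) / 2 :=
    PySem.Int.floordiv_eq_ediv_of_pos (by norm_num)
  have h2 : PySem.Int.floordiv (c * (c - 1)) 2 = (c * (c - 1)) / 2 :=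
    PySem.Int.floordiv_eq_ediv_of_pos (by norm_num)
  have e : (c + 1) * (c + 1 - 1) = c * (c - 1) + 2 * c := by ring
  rw [h1, h2, e]
  omega

theorem pvT_one : pvT 1 = 0 := by decide

theorem pvT_double (c : Int) : 2 * pvT c = c * (c - 1) := by
  unfold pvT
  have h2 : PySem.Int.floordiv (c * (c - 1)) 2 = (c * (c - 1)) / 2 :=
    PySem.Int.floordiv_eq_ediv_of_pos (by norm_num)
  have he : Even (c * (c - 1)) := by
    have := Int.even_mul_succ_self (c - 1)
    have e : (c - 1) * (c - 1 + 1) = c * (c - 1) := by ring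
    rwa [e] at this
  obtain ⟨k, hk⟩ := he
  omega

theorem pvT_add_nat (a : Int) (h0 : 0 ≤ a) : ∀ (m : Nat), pvT a ≤ pvT (a + m) := by
  intro m
  induction m with
  | zero => simp
  | succ m ih =>
    have h := pvT_succ (a + m)
    have : (a : Int) + (m + 1 : Nat) = (a + m) + 1 := by push_cast; ring
    rw [this, h]
    have : (0:Int) ≤ a + m := by positivity
    omega

theorem pvT_mono (a b : Int) (h0 : 0 ≤ a) (h : a ≤ b) : pvT a ≤ pvT b := by
  have hb : b = a + ((b - a).toNat : Int) := by omega
  rw [hb]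
  exact pvT_add_nat a h0 (b - a).toNat

theorem pvInnerLoop_spec (edge_var col : Int) :
    ∀ (m : Nat) (row current : Int),
      pvInnerLoop edge_var col m row current =
        if current ≤ edge_var ∧ edge_var < current + (m : Int) then
          (some (row + (edge_var - current), col), edge_var)
        else (none, current + (m : Int)) := by
  intro m
  induction m with
  | zero =>
    intro row current
    rw [pvInnerLoop, if_neg (by push_cast; omega)]
    push_cast
    simp
  | succ m ih =>
    intro row current
    rw [pvInnerLoop]
    by_cases hc : current = edge_var
    · rw [if_pos hc, if_pos (by push_cast; omega)]
      have h1 : row + (edge_var - current) = row := by omega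
      rw [h1, hc]
    · rw [if_neg hc, ih (row + 1) (current + 1)]
      by_cases h2 : current + 1 ≤ edge_var ∧ edge_var < current + 1 + (m : Int)
      · rw [if_pos h2, if_pos (by push_cast at h2 ⊢; omega)]
        have : row + 1 + (edge_var - (current + 1)) = row + (edge_var - current) := by omega
        rw [this]
      · rw [if_neg h2, if_neg (by push_cast at h2 ⊢; omega)]
        have : current + 1 + (m : Int) = current + ((m + 1 : Nat) : Int) := by push_cast; ring
        rw [this]

theorem pvOuterLoop_found (edge_var c : Int) (hc0 : 0 ≤ c)
    (hlt : pvT c < edge_var) (hle : edge_var ≤ pvT (c + 1)) :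
    ∀ (fuel : Nat) (col : Int), 0 ≤ col → col ≤ c → c < col + fuel →
      pvOuterLoop edge_var fuel col (pvT col + 1) =
        (some (edge_var - 1 - pvT c, c), edge_var) := by
  intro fuel
  induction fuel with
  | zero =>
    intro col _ h1 h2
    push_cast at h2
    omega
  | succ fuel ih =>
    intro col hcol h1 h2
    rw [pvOuterLoop, pvInnerLoop_spec]
    have hcast : ((col.toNat : Int)) = col := by omega
    rw [hcast]
    by_cases heq : col = c
    · subst heq
      have hs := pvT_succ col
      rw [if_pos (by omega)]
      have : (0:Int) + (edge_var - (pvT col + 1)) = edge_var - 1 - pvT col := by omega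
      rw [this]
    · -- col < c: this column is exhausted without a hit
      have hcol_lt : col < c := by omega
      have hs := pvT_succ col
      have hmono : pvT (col + 1) ≤ pvT c := pvT_mono _ _ (by omega) (by omega)
      rw [if_neg (by omega)]
      have h1' : pvT col + 1 + col = pvT (col + 1) + 1 := by omega
      rw [h1']
      exact ih (col + 1) (by omega) (by omega) (by push_cast at h2 ⊢; omega)

theorem pvBsearchGo_spec (edge_var : Int) :
    ∀ (fuel : Nat) (lo hi : Int), (hi - lo).toNat ≤ fuel → lo ≤ hi →
      pvT lo < edge_var → edge_var ≤ pvT (hi + 1) →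
      lo ≤ pvBsearchGo edge_var fuel lo hi ∧ pvBsearchGo edge_var fuel lo hi ≤ hi ∧
        pvT (pvBsearchGo edge_var fuel lo hi) < edge_var ∧
        edge_var ≤ pvT (pvBsearchGo edge_var fuel lo hi + 1) := by
  intro fuel
  induction fuel with
  | zero =>
    intro lo hi hf hle hlo hhi
    have heq : lo = hi := by omega
    exact ⟨le_refl _, hle, hlo, heq ▸ hhi⟩
  | succ fuel ih =>
    intro lo hi hf hle hlo hhi
    rw [pvBsearchGo]
    split_ifs with h hcond
    · -- the triangular count at mid already reaches edge_var: search left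
      have h2 : pvMid lo hi = (lo + hi) / 2 := PySem.Int.floordiv_eq_ediv_of_pos (by norm_num)
      have hmlo : lo ≤ pvMid lo hi := by omega
      have hmlt : pvMid lo hi < hi := by omega
      have htm : PySem.Int.floordiv (pvMid lo hi * (pvMid lo hi + 1)) 2 = pvT (pvMid lo hi + 1) := by
        unfold pvT; congr 1; ring
      rw [htm] at hcond
      obtain ⟨a, b, c, d⟩ := ih lo (pvMid lo hi) (by omega) (by omega) hlo (by omega)
      exact ⟨a, by omega, c, d⟩
    · -- search right
      have h2 : pvMid lo hi = (lo + hi) / 2 := PySem.Int.floordiv_eq_ediv_of_pos (by norm_num)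
      have hmlo : lo ≤ pvMid lo hi := by omega
      have hmlt : pvMid lo hi < hi := by omega
      have htm : PySem.Int.floordiv (pvMid lo hi * (pvMid lo hi + 1)) 2 = pvT (pvMid lo hi + 1) := by
        unfold pvT; congr 1; ring
      rw [htm] at hcond
      obtain ⟨a, b, c, d⟩ := ih (pvMid lo hi + 1) hi (by omega) (by omega) (by omega) hhi
      exact ⟨by omega, b, c, d⟩
    · -- lo = hi: the loop did not run
      have heq : lo = hi := by omega
      exact ⟨le_refl _, hle, hlo, heq ▸ hhi⟩

theorem pvBsearch_spec (edge_var lo hi : Int) (hle : lo ≤ hi)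
    (hlo : pvT lo < edge_var) (hhi : edge_var ≤ pvT (hi + 1)) :
    lo ≤ pvBsearch edge_var lo hi ∧ pvBsearch edge_var lo hi ≤ hi ∧
      pvT (pvBsearch edge_var lo hi) < edge_var ∧ edge_var ≤ pvT (pvBsearch edge_var lo hi + 1) :=
  pvBsearchGo_spec edge_var (hi - lo).toNat lo hi (le_refl _) hle hlo hhi

-- ===== VERDICT (by name: the statement is the Claim_ definition above) =====
theorem edge_var_to_vertices_spec : Claim_equal_edge_var_to_vertices := by
  intro edge_var n _hdom hpre
  obtain ⟨hn, he1, he2⟩ := hpre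
  unfold Spec_edge_var_to_vertices
  have htot : PySem.Int.floordiv (n * (n - 1)) 2 = pvT n := rfl
  have hd := pvT_double n
  have heT : edge_var ≤ pvT n := by omega
  have hbs := pvBsearch_spec edge_var 1 (n - 1) (by omega)
      (by rw [pvT_one]; omega) (by simpa using heT)
  set c := pvBsearch edge_var 1 (n - 1) with hcdef
  obtain ⟨hc1, hc2, hc3, hc4⟩ := hbs
  unfold edge_var_to_vertices edge_var_to_vertices_alt
  have hout := pvOuterLoop_found edge_var c (by omega) hc3 hc4 (n - 1).toNat 1
      (by omega) (by omega) (by omega)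
  rw [pvT_one] at hout
  have h01 : (0:Int) + 1 = 1 := by norm_num
  rw [h01] at hout
  rw [hout]
  simp only [htot]
  rw [if_pos ⟨he1, heT⟩]
  rfl
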